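-- pv_equiv track=rewrite | github.com/crazyman9870/418-Bioinformatics | HW8/invertburrowswheelertransform.py | enumerateWord
-- ===== SOURCE A (Python) =====
-- def enumerateWord(word):
-- 	'''
-- 	Enumerates like characters in the order of their appearance for the given word.
-- 	i.e. 'abcbba' returns ['a0', 'b0', 'c0', 'b1', 'b2', 'a1']
-- 	'''
--
-- 	# Initialize the character count and enumerated character list.
-- 	char_count = {}
-- 	enumerated = []
--
-- 	# Enumerate like characters.
-- 	for ch in word:
-- 		if ch not in char_count:
-- 			char_count[ch] = 0
-- 		else:
-- 			char_count[ch] += 1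
-- 		enumerated.append(ch+str(char_count[ch]))
--
-- 	return enumerated
-- ===== SOURCE B (Python) =====
-- def enumerateWord(word):
-- 	'''
-- 	Enumerates like characters in the order of their appearance for the given word.
-- 	i.e. 'abcbba' returns ['a0', 'b0', 'c0', 'b1', 'b2', 'a1']
-- 	'''
-- 	# Group: for each character, the ordered list of positions where it occurs.
-- 	positions = {}
-- 	for i, ch in enumerate(word):
-- 		positions.setdefault(ch, []).append(i)
-- 	# Scatter: write ch + occurrence-number back to each position.
-- 	result = [''] * len(word)
-- 	for ch, idxs in positions.items():
-- 		for occ, pos in enumerate(idxs):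
-- 			result[pos] = ch + str(occ)
-- 	return result
-- ===== Notes on version B (the rewrite author's own statement) =====
-- stated objective: alternative
-- what changed: Replaces the sequential loop with a running per-character counter dict by a two-phase group-and-scatter: first group the positions of each character, then write each position's label from its occurrence number in that character's position list.
import Mathlib
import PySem

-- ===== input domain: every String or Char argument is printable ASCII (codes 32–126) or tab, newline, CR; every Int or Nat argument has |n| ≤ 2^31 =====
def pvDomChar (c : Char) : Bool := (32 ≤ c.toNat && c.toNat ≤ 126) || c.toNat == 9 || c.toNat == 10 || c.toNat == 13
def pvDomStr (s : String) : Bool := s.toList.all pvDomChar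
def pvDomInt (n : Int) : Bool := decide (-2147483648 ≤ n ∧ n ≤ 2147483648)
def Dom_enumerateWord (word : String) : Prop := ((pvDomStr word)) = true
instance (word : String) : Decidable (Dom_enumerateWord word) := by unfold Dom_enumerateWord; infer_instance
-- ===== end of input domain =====

-- B replaces A's running mutable-dict counter by a two-phase group-and-scatter (group positions per character, then write each label back by position); alternative decomposition, same values.

-- ===== PORT A =====
def enumerateWord (word : String) : List String :=
  (word.toList.foldl
    (fun (st : PySem.Dict Char Int × List String) ch =>
      let d := if st.1.contains ch = false then st.1.insert ch 0
               else st.1.modify ch 0 (· + 1)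
      (d, st.2 ++ [String.ofList [ch] ++ PySem.Int.toStr (d.getD ch 0)]))
    (PySem.Dict.empty, [])).2

-- ===== PORT B =====
-- `result[pos] = ch + str(occ)` is ported as List.set pos.toNat; exact here because every
-- pos comes from enumerate(word), so 0 ≤ pos < len(result).
def enumerateWord_alt (word : String) : List String :=
  let chars := word.toList
  let positions := (PySem.List.enumerate chars).foldl
      (fun (d : PySem.Dict Char (List Int)) q => d.modify q.2 [] (· ++ [q.1]))
      PySem.Dict.empty
  let result := List.replicate chars.length ""
  positions.items.foldl
    (fun res it =>
      (PySem.List.enumerate it.2).foldl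
        (fun res q => res.set q.2.toNat (String.ofList [it.1] ++ PySem.Int.toStr q.1)) res)
    result

-- ===== PRECONDITION & SPEC =====
def Spec_enumerateWord (word : String) (out : List String) : Prop := out = enumerateWord_alt word
instance (word : String) (out : List String) : Decidable (Spec_enumerateWord word out) := by unfold Spec_enumerateWord; infer_instance

-- ===== CLAIM (what is proved, stated in full; the proofs are below) =====
def Claim_equal_enumerateWord : Prop := ∀ (word : String), Dom_enumerateWord word → Spec_enumerateWord word (enumerateWord word)

-- ===== LEMMAS AND PROOFS =====

/-- Common specification: label each char of `l` with the count of it in the prefix `p` seen so far. -/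
def specGo (p l : List Char) : List String :=
  match l with
  | [] => []
  | ch :: t => (String.ofList [ch] ++ PySem.Int.toStr ((p.count ch : Nat) : Int)) :: specGo (p ++ [ch]) t

/-- The ordered positions (as Ints, offset by `s`) at which `c` occurs in `l`. -/
def idxList (c : Char) (s : Nat) : List Char → List Int
  | [] => []
  | x :: t => if x = c then (s : Int) :: idxList c (s + 1) t else idxList c (s + 1) t

lemma loopA (l : List Char) (p : List Char) (d : PySem.Dict Char Int) (acc : List String)
    (hc : ∀ c, d.contains c = decide (c ∈ p))
    (hg : ∀ c, c ∈ p → d.getD c 0 = (p.count c : Int) - 1) :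
    (l.foldl
      (fun (st : PySem.Dict Char Int × List String) ch =>
        let d := if st.1.contains ch = false then st.1.insert ch 0
                 else st.1.modify ch 0 (· + 1)
        (d, st.2 ++ [String.ofList [ch] ++ PySem.Int.toStr (d.getD ch 0)]))
      (d, acc)).2 = acc ++ specGo p l := by
  induction l generalizing p d acc with
  | nil => simp [specGo]
  | cons ch t ih =>
    by_cases hmem : ch ∈ p
    · have hcontains : d.contains ch = true := by rw [hc]; simpa
      have hval : (d.modify ch 0 (· + 1)).getD ch 0 = ((p.count ch : Nat) : Int) := by
        rw [PySem.Dict.getD_modify_self, hg ch hmem]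
        have : 1 ≤ p.count ch := List.one_le_count_iff.mpr hmem
        omega
      simp only [List.foldl_cons, hcontains, Bool.true_eq_false, if_false]
      rw [ih (p ++ [ch]) _ _
        (fun c => by
          simp only [PySem.Dict.contains_modify, hc]
          by_cases h : c = ch <;> simp [h, hmem])
        (fun c hcmem => by
          rcases eq_or_ne c ch with rfl | hne
          · rw [hval]
            have hcnt : (p ++ [c]).count c = p.count c + 1 := by simp
            rw [hcnt]
            push_cast
            ring
          · have hcp : c ∈ p := by
              rcases List.mem_append.mp hcmem with h | h
              · exact h
              · simp at h; exact absurd h hne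
            rw [PySem.Dict.getD_modify_of_ne d 0 _ hne, hg c hcp]
            simp [List.count_append, Ne.symm hne])]
      simp [specGo, hval, List.append_assoc]
    · have hcontains : d.contains ch = false := by rw [hc]; simpa
      have hval : (d.insert ch 0).getD ch 0 = ((p.count ch : Nat) : Int) := by
        rw [PySem.Dict.getD_insert_self]
        simp [List.count_eq_zero_of_not_mem hmem]
      simp only [List.foldl_cons, hcontains, reduceIte]
      rw [ih (p ++ [ch]) _ _
        (fun c => by
          simp only [PySem.Dict.contains_insert, hc]
          by_cases h : c = ch <;> simp [h])
        (fun c hcmem => by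
          rcases eq_or_ne c ch with rfl | hne
          · rw [hval]
            simp [List.count_append, List.count_eq_zero_of_not_mem hmem]
          · have hcp : c ∈ p := by
              rcases List.mem_append.mp hcmem with h | h
              · exact h
              · simp at h; exact absurd h hne
            rw [PySem.Dict.getD_insert_of_ne d 0 0 hne, hg c hcp]
            simp [List.count_append, Ne.symm hne])]
      simp [specGo, hval, List.append_assoc]

lemma specGo_getElem? (l : List Char) : ∀ (p : List Char) (k : Nat),
    (specGo p l)[k]? =
      l[k]?.map (fun ch => String.ofList [ch] ++ PySem.Int.toStr (((p ++ l.take k).count ch : Nat) : Int)) := by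
  induction l with
  | nil => intro p k; simp [specGo]
  | cons ch t ih =>
    intro p k
    cases k with
    | zero => simp [specGo]
    | succ k =>
      simp only [specGo, List.getElem?_cons_succ, ih (p ++ [ch]) k, List.take_succ_cons,
        List.append_assoc, List.singleton_append]

/-- The grouping fold: each character's entry collects its positions in order. -/
lemma groupD (l : List (Int × Char)) : ∀ (d : PySem.Dict Char (List Int)) (c : Char),
    (l.foldl (fun d q => d.modify q.2 [] (· ++ [q.1])) d).getD c [] =
      d.getD c [] ++ (l.filter (fun q => q.2 == c)).map (·.1) := by
  induction l with
  | nil => intro d c; simp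
  | cons q t ih =>
    intro d c
    simp only [List.foldl_cons, List.filter_cons]
    rw [ih, PySem.Dict.getD_modify]
    by_cases h : c = q.2
    · simp [h, List.append_assoc]
    · simp [h, Ne.symm h]

lemma filterEnum (c : Char) (l : List Char) : ∀ (s : Nat),
    ((PySem.List.enumerate l (s : Int)).filter (fun q => q.2 == c)).map (·.1) = idxList c s l := by
  induction l with
  | nil => intro s; simp [idxList, PySem.List.enumerate_nil]
  | cons x t ih =>
    intro s
    rw [PySem.List.enumerate_cons, show (s : Int) + 1 = ((s + 1 : Nat) : Int) from by push_cast; ring,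
      List.filter_cons]
    by_cases h : x = c
    · subst h
      rw [show idxList x s (x :: t) = (s : Int) :: idxList x (s + 1) t from by simp [idxList],
        if_pos (by simp), List.map_cons, ih (s + 1)]
    · rw [show idxList c s (x :: t) = idxList c (s + 1) t from by simp [idxList, h],
        if_neg (by simp [h]), ih (s + 1)]

lemma setFold_length (g : Int → Char → String) (c : Char) (ql : List (Int × Int)) :
    ∀ (res : List String),
      (ql.foldl (fun r q => r.set q.2.toNat (g q.1 c)) res).length = res.length := by
  induction ql with
  | nil => intro res; simp
  | cons q t ih => intro res; simp [List.foldl_cons, ih, List.length_set]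

/-- The scatter loop of one character: it writes `ch+str(occ)` exactly at the occurrences of `c`. -/
lemma inner_spec (c : Char) (l : List Char) : ∀ (p : List Char) (m : Nat) (res : List String) (j : Nat),
    res.length = (p ++ l).length →
    ((PySem.List.enumerate (idxList c p.length l) (m : Int)).foldl
        (fun r q => r.set q.2.toNat (String.ofList [c] ++ PySem.Int.toStr q.1)) res)[j]? =
      if p.length ≤ j ∧ (p ++ l)[j]? = some c
      then some (String.ofList [c] ++ PySem.Int.toStr ((m : Int) + ((l.take (j - p.length)).count c : Nat)))
      else res[j]? := by
  induction l with
  | nil =>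
    intro p m res j _
    simp only [idxList, PySem.List.enumerate_nil, List.foldl_nil, List.append_nil]
    rw [if_neg]
    rintro ⟨h1, h2⟩
    rw [List.getElem?_eq_none h1] at h2
    exact absurd h2 (by simp)
  | cons x t ih =>
    intro p m res j hlen
    have hassoc : (p ++ [x]) ++ t = p ++ x :: t := by simp
    have hlen' : res.length = p.length + t.length + 1 := by
      simp only [List.length_append, List.length_cons] at hlen; omega
    have hlen1 : (p ++ [x]).length = p.length + 1 := by simp
    by_cases hx : x = c
    · subst hx
      rw [show idxList x p.length (x :: t) = (p.length : Int) :: idxList x (p.length + 1) t from by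
        simp [idxList]]
      rw [PySem.List.enumerate_cons]
      simp only [List.foldl_cons, Int.toNat_natCast]
      have hm1 : (m : Int) + 1 = ((m + 1 : Nat) : Int) := by push_cast; ring
      rw [hm1, show p.length + 1 = (p ++ [x]).length from hlen1.symm,
        ih (p ++ [x]) (m + 1) _ j (by
          simp only [List.length_set, hassoc]
          exact hlen),
        hassoc]
      rcases Nat.lt_trichotomy j p.length with hj | hj | hj
      · rw [if_neg (fun h => absurd h.1 (by omega)),
          if_neg (fun h => absurd h.1 (by omega)),
          List.getElem?_set, if_neg (by omega)]
      · subst hj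
        rw [if_neg (fun h => absurd h.1 (by rw [hlen1]; omega))]
        rw [List.getElem?_set, if_pos rfl, if_pos (by omega)]
        rw [if_pos ⟨le_refl _, by
          rw [List.getElem?_append_right (le_refl _)]
          simp⟩]
        simp
      · have ht : j - p.length = (j - (p ++ [x]).length) + 1 := by rw [hlen1]; omega
        by_cases hc : (p ++ x :: t)[j]? = some x
        · rw [if_pos ⟨by rw [hlen1]; omega, hc⟩, if_pos ⟨by omega, hc⟩]
          have harg : ((m + 1 : Nat) : Int) + (((t.take (j - (p ++ [x]).length)).count x : Nat) : Int)
              = (m : Int) + ((((x :: t).take (j - p.length)).count x : Nat) : Int) := by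
            rw [ht, List.take_succ_cons]
            have hcnt : (x :: t.take (j - (p ++ [x]).length)).count x
                = (t.take (j - (p ++ [x]).length)).count x + 1 := by simp
            rw [hcnt]
            push_cast
            ring
          rw [harg]
        · rw [if_neg (fun h => hc h.2), if_neg (fun h => hc h.2),
            List.getElem?_set, if_neg (by omega)]
    · rw [show idxList c p.length (x :: t) = idxList c (p.length + 1) t from by
        simp [idxList, hx]]
      rw [show p.length + 1 = (p ++ [x]).length from hlen1.symm,
        ih (p ++ [x]) m res j (by rw [hassoc]; exact hlen), hassoc]
      rcases Nat.lt_trichotomy j p.length with hj | hj | hj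
      · rw [if_neg (fun h => absurd h.1 (by omega)),
          if_neg (fun h => absurd h.1 (by omega))]
      · subst hj
        rw [if_neg (fun h => absurd h.1 (by rw [hlen1]; omega)),
          if_neg (fun h => by
            have h2 := h.2
            rw [List.getElem?_append_right (le_refl _)] at h2
            simp at h2
            exact hx h2)]
      · have ht : j - p.length = (j - (p ++ [x]).length) + 1 := by rw [hlen1]; omega
        by_cases hc : (p ++ x :: t)[j]? = some c
        · rw [if_pos ⟨by rw [hlen1]; omega, hc⟩, if_pos ⟨by omega, hc⟩]
          have harg : ((t.take (j - (p ++ [x]).length)).count c : Nat)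
              = (((x :: t).take (j - p.length)).count c : Nat) := by
            rw [ht, List.take_succ_cons]
            simp [hx]
          rw [harg]
        · rw [if_neg (fun h => hc h.2), if_neg (fun h => hc h.2)]

/-- The scatter loop over a set of characters. -/
lemma outer_spec (chars : List Char) (S : List Char) : ∀ (res : List String), res.length = chars.length → ∀ (j : Nat),
    (S.foldl (fun r c =>
        (PySem.List.enumerate (idxList c 0 chars)).foldl
          (fun r q => r.set q.2.toNat (String.ofList [c] ++ PySem.Int.toStr q.1)) r) res)[j]? =
      match chars[j]? with
      | some ch => if ch ∈ S
          then some (String.ofList [ch] ++ PySem.Int.toStr (((chars.take j).count ch : Nat) : Int))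
          else res[j]?
      | none => res[j]? := by
  induction S with
  | nil => intro res _ j; cases chars[j]? <;> simp
  | cons c S ih =>
    intro res hres j
    have hlen2 : ((PySem.List.enumerate (idxList c 0 chars)).foldl
        (fun r q => r.set q.2.toNat (String.ofList [c] ++ PySem.Int.toStr q.1)) res).length
        = chars.length := by
      rw [setFold_length (fun i c => String.ofList [c] ++ PySem.Int.toStr i) c]
      exact hres
    have hinner := inner_spec c chars [] 0 res j (by simpa using hres)
    simp only [List.nil_append, List.length_nil, Nat.cast_zero, Nat.zero_le, true_and,
      Nat.sub_zero, zero_add] at hinner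
    rw [List.foldl_cons, ih _ hlen2 j]
    cases hch : chars[j]? with
    | none =>
      simp only []
      rw [hinner, if_neg (by simp [hch])]
    | some ch =>
      simp only []
      by_cases hS : ch ∈ S
      · simp [hS]
      · simp only [hS, if_false]
        rw [hinner]
        by_cases hcc : ch = c
        · subst hcc
          rw [if_pos hch, if_pos (List.mem_cons_self)]
        · rw [if_neg (by rw [hch]; simp [hcc]), if_neg (by simp [hS, hcc])]

-- ===== VERDICT (by name: the statement is the Claim_ definition above) =====
theorem enumerateWord_spec : Claim_equal_enumerateWord := by
  intro word _
  unfold Spec_enumerateWord enumerateWord enumerateWord_alt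
  rw [loopA word.toList [] PySem.Dict.empty []
    (fun c => by simp [PySem.Dict.contains_empty])
    (fun c h => by simp at h)]
  simp only [List.nil_append]
  set chars := word.toList with hchars
  set positions := (PySem.List.enumerate chars).foldl
      (fun (d : PySem.Dict Char (List Int)) q => d.modify q.2 [] (· ++ [q.1]))
      PySem.Dict.empty with hpos
  have hnodup : positions.keys.Nodup := by
    rw [hpos]
    exact PySem.Dict.nodup_keys_foldl_modify_key (PySem.List.enumerate chars)
      (fun q : Int × Char => q.2) ([] : List Int) (fun _ q v => v ++ [q.1]) PySem.Dict.empty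
      (by simp)
  have hkeys : positions.keys = PySem.Set.ofList chars := by
    have h1 := PySem.Dict.keys_foldl_modify_key (PySem.List.enumerate chars)
      (fun q : Int × Char => q.2) ([] : List Int) (fun _ q v => v ++ [q.1]) PySem.Dict.empty
    rw [hpos]
    simpa [PySem.List.map_snd_enumerate, PySem.Set.update, PySem.Set.ofList] using h1
  have hgetD : ∀ c, positions.getD c [] = idxList c 0 chars := by
    intro c
    rw [hpos, groupD]
    rw [show (PySem.Dict.empty : PySem.Dict Char (List Int)).getD c [] = [] from by simp]
    rw [List.nil_append]
    rw [show (0 : Int) = ((0 : Nat) : Int) from rfl]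
    exact filterEnum c chars 0
  have hitems : positions.items = positions.keys.map (fun c => (c, idxList c 0 chars)) := by
    rw [PySem.Dict.items_eq_map_keys positions hnodup []]
    exact List.map_congr_left (fun c _ => by rw [hgetD c])
  rw [hitems, hkeys, List.foldl_map]
  apply List.ext_getElem?
  intro j
  rw [outer_spec chars (PySem.Set.ofList chars) _ (by simp) j, specGo_getElem? chars [] j]
  cases hch : chars[j]? with
  | none =>
    have hj : chars.length ≤ j := by
      by_contra h
      rw [List.getElem?_eq_getElem (by omega)] at hch
      exact absurd hch (by simp)
    simp [List.getElem?_eq_none, hj]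
  | some ch =>
    have hmem : ch ∈ chars := List.mem_of_getElem? hch
    simp [PySem.Set.mem_ofList, hmem]
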